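-- pv_equiv track=rewrite | github.com/Emb3dev/crm_local | app.py | _build_category_filter_options
-- ===== SOURCE A (Python) =====
-- from typing import Optional, Dict, List, Iterable, Union, Annotated, Any, Tuple
--
-- def _build_category_filter_options(
--     groups: Iterable[Dict[str, Any]]
-- ) -> List[Tuple[str, str]]:
--     seen: set[str] = set()
--     options: List[Tuple[str, str]] = []
--     for group in groups:
--         title = group.get("title")
--         if title and title not in seen:
--             options.append((title, title))
--             seen.add(title)
--     return options
-- ===== SOURCE B (Python) =====
-- from typing import Dict, List, Iterable, Any, Tuple
--
-- def _build_category_filter_options(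
--     groups: Iterable[Dict[str, Any]]
-- ) -> List[Tuple[str, str]]:
--     # Sieve-style dedup: emit the first truthy title, strip its duplicates
--     # from the tail, recurse on what remains.
--     titles = [t for t in (g.get("title") for g in groups) if t]
--
--     def sieve(ts: List[str]) -> List[Tuple[str, str]]:
--         if not ts:
--             return []
--         h = ts[0]
--         return [(h, h)] + sieve([t for t in ts[1:] if t != h])
--
--     return sieve(titles)
-- ===== Notes on version B (the rewrite author's own statement) =====
-- stated objective: alternative
-- what changed: Replaces A's single pass that maintains an explicit 'seen' set with a recursive sieve: extract the truthy titles, then repeatedly emit the first remaining title and filter all of its later duplicates out of the tail before recursing — no membership structure is kept at all.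
import Mathlib
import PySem

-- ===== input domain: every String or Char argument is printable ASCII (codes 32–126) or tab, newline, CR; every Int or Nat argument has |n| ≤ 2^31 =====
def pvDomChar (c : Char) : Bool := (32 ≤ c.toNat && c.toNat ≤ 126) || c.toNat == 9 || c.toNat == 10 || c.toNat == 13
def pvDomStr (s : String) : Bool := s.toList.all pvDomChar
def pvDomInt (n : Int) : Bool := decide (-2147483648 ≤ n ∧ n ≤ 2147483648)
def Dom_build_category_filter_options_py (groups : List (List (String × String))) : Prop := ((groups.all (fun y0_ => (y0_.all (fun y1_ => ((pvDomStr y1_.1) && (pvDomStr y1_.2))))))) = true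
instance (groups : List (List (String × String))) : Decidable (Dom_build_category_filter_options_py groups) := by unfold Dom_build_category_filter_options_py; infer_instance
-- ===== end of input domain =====

-- B replaces A's single pass with a 'seen' set by a recursive sieve over the truthy titles
-- (emit the first, filter its duplicates out of the tail, recurse); alternative decomposition.

-- ===== PORT A =====
-- the for-loop of A with its two accumulators (seen set, options list)
def pvALoop : List (List (String × String)) → PySem.Set String → List (String × String) → List (String × String)
  | [], _, options => options
  | g :: rest, seen, options =>
    match (PySem.Dict.mk g).get? "title" with
    | some t =>
      if t != "" && !(PySem.Set.contains seen t) then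
        pvALoop rest (PySem.Set.add seen t) (options ++ [(t, t)])
      else
        pvALoop rest seen options
    | none => pvALoop rest seen options

def build_category_filter_options_py (groups : List (List (String × String))) : List (String × String) :=
  pvALoop groups PySem.Set.empty []

-- ===== PORT B =====
-- Source B's sieve: emit ts[0], drop its duplicates from ts[1:], recurse
def pvSieve : List String → List (String × String)
  | [] => []
  | h :: ts => (h, h) :: pvSieve (ts.filter (fun t => t != h))
termination_by ts => ts.length
decreasing_by
  simpa using Nat.lt_succ_of_le (List.length_filter_le _ ts)

def build_category_filter_options_py_alt (groups : List (List (String × String))) : List (String × String) :=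
  let titles := (groups.map (fun g => (PySem.Dict.mk g).get? "title")).filterMap
    (fun t? => t?.bind (fun t => if t != "" then some t else none))
  pvSieve titles

-- ===== PRECONDITION & SPEC =====
def Spec_build_category_filter_options_py (groups : List (List (String × String))) (out : List (String × String)) : Prop := out = build_category_filter_options_py_alt groups
instance (groups : List (List (String × String))) (out : List (String × String)) : Decidable (Spec_build_category_filter_options_py groups out) := by unfold Spec_build_category_filter_options_py; infer_instance

-- ===== CLAIM (what is proved, stated in full; the proofs are below) =====
def Claim_equal_build_category_filter_options_py : Prop := ∀ (groups : List (List (String × String))), Dom_build_category_filter_options_py groups → Spec_build_category_filter_options_py groups (build_category_filter_options_py groups)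

-- ===== LEMMAS AND PROOFS =====

-- the truthy titles of groups (the list both programs dedupe)
def pvTruthy (groups : List (List (String × String))) : List String :=
  (groups.map (fun g => (PySem.Dict.mk g).get? "title")).filterMap
    (fun t? => t?.bind (fun t => if t != "" then some t else none))

lemma pvTruthy_cons (g : List (String × String)) (rest : List (List (String × String))) :
    pvTruthy (g :: rest) =
      (match (PySem.Dict.mk g).get? "title" with
        | some t => if t != "" then t :: pvTruthy rest else pvTruthy rest
        | none => pvTruthy rest) := by
  simp only [pvTruthy, List.map_cons, List.filterMap_cons]
  cases h : (PySem.Dict.mk g).get? "title" with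
  | none => rfl
  | some t =>
    by_cases ht : t = "" <;> simp [Option.bind, ht]

-- loop invariant: A's loop appends the titles that Set.update would newly append to seen
lemma pvALoop_eq (groups : List (List (String × String))) :
    ∀ (seen : PySem.Set String) (options : List (String × String)),
      pvALoop groups seen options =
        options ++ ((PySem.Set.update seen (pvTruthy groups)).drop seen.length).map (fun t => (t, t)) := by
  induction groups with
  | nil =>
    intro seen options
    simp [pvALoop, pvTruthy, PySem.Set.update]
  | cons g rest ih =>
    intro seen options
    rw [pvALoop]
    rw [pvTruthy_cons]
    cases h : (PySem.Dict.mk g).get? "title" with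
    | none => exact ih seen options
    | some t =>
      by_cases ht : t = ""
      · simp only [ht]
        simpa using ih seen options
      · have htb : (t != "") = true := by simp [ht]
        simp only [htb, Bool.true_and, if_true]
        by_cases hmem : t ∈ seen
        · have hct : PySem.Set.contains seen t = true := (PySem.Set.contains_iff seen t).mpr hmem
          simp only [hct, Bool.not_true, Bool.false_eq_true, if_false]
          rw [ih seen options, PySem.Set.update_cons, PySem.Set.add_of_mem hmem]
        · have hc : PySem.Set.contains seen t = false := by
            cases hcc : PySem.Set.contains seen t
            · rfl
            · exact absurd ((PySem.Set.contains_iff seen t).mp hcc) hmem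
          simp only [hc, Bool.not_false, reduceIte]
          rw [ih (PySem.Set.add seen t) (options ++ [(t, t)]),
              PySem.Set.update_cons,
              PySem.Set.add_of_not_mem hmem,
              PySem.Set.update_eq_append_filter,
              List.drop_left,
              List.append_assoc seen [t],
              List.drop_left]
          simp

-- discard on set(xs) is set of the filtered list
lemma pvDiscard_ofList (ts : List String) (x : String) :
    PySem.Set.discard (PySem.Set.ofList ts) x = PySem.Set.ofList (ts.filter (fun t => t != x)) := by
  induction ts with
  | nil => rfl
  | cons h rest ih =>
    simp only [PySem.Set.ofList_cons, List.filter_cons]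
    by_cases hx : h = x
    · subst hx
      simp only [bne_self_eq_false, Bool.false_eq_true, if_false, ← ih]
      simp [PySem.Set.discard, List.filter_filter]
    · have hb : (h != x) = true := by simp [hx]
      simp only [hb, if_true, PySem.Set.ofList_cons, ← ih]
      simp only [PySem.Set.discard]
      rw [List.filter_cons]
      simp only [List.filter_filter]
      have : (!h == x) = true := by simp [hx]
      rw [if_pos this]
      congr 1
      congr 1
      funext a
      rw [Bool.and_comm]

-- the sieve computes set(ts) mapped to pairs
lemma pvSieve_eq (ts : List String) :
    pvSieve ts = (PySem.Set.ofList ts).map (fun t => (t, t)) := by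
  induction hn : ts.length using Nat.strong_induction_on generalizing ts with
  | _ n ih =>
    cases ts with
    | nil => simp [pvSieve]
    | cons h rest =>
      rw [pvSieve, PySem.Set.ofList_cons, pvDiscard_ofList]
      simp only [List.map_cons, List.cons.injEq, true_and]
      exact ih (rest.filter (fun t => t != h)).length
        (by simpa [← hn] using Nat.lt_succ_of_le (List.length_filter_le _ rest)) _ rfl

-- ===== VERDICT (by name: the statement is the Claim_ definition above) =====
theorem build_category_filter_options_py_spec : Claim_equal_build_category_filter_options_py := by
  intro groups _
  unfold Spec_build_category_filter_options_py build_category_filter_options_py build_category_filter_options_py_alt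
  rw [pvALoop_eq groups PySem.Set.empty []]
  rw [show PySem.Set.update PySem.Set.empty (pvTruthy groups) = PySem.Set.ofList (pvTruthy groups)
        from PySem.Set.update_nil_left _]
  rw [pvSieve_eq]
  simp [pvTruthy, PySem.Set.empty]
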